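-- pv_equiv track=rewrite | github.com/pypi-data/pypi-mirror-398 | packages/JSTprove/jstprove-1.4.0-py3-none-manylinux2014_x86_64.manylinux_2_17_x86_64.whl/python/scripts/gen_and_bench.py | _max_pools_allowed
-- ===== SOURCE A (Python) =====
-- def _max_pools_allowed(input_hw: int, stop_at_hw: int) -> int:
--     """
--     Given an input size H=W=input_hw, return how many 2×2/stride-2 pools
--     can be applied while keeping H >= stop_at_hw.
--     """
--     two = 2
--     if input_hw <= 0 or stop_at_hw <= 0:
--         return 0
--     pools = 0
--     h = input_hw
--     while h >= two and (h // two) >= stop_at_hw: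
--         pools += 1
--         h //= two
--     return pools
-- ===== SOURCE B (Python) =====
-- def _max_pools_allowed(input_hw: int, stop_at_hw: int) -> int:
--     """Closed-form: number of halvings keeping h >= stop_at_hw is floor(log2(input_hw // stop_at_hw))."""
--     if input_hw <= 0 or stop_at_hw <= 0:
--         return 0
--     q = input_hw // stop_at_hw
--     return q.bit_length() - 1 if q >= 1 else 0
-- ===== Notes on version B (the rewrite author's own statement) =====
-- stated objective: simpler
-- what changed: Replaced the repeated-halving while loop by the closed form max over the guard: q = input_hw // stop_at_hw and q.bit_length() - 1 (0 when q == 0), i.e. floor(log2(q)), computed in O(1).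
import Mathlib
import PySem

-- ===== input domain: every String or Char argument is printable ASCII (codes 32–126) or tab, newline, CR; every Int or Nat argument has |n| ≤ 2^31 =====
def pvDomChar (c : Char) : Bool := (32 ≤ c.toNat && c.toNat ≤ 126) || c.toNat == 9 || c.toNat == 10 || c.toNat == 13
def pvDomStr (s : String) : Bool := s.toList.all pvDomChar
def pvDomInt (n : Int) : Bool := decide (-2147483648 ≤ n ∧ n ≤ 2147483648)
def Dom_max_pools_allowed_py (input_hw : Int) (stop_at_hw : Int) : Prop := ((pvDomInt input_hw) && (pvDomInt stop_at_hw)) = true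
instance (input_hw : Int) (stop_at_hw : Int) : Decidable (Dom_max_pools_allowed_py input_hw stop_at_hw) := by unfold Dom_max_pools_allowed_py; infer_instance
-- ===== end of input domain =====

-- B replaces A's halving loop by the closed form max(0, (input_hw // stop_at_hw).bit_length() - 1): O(1) arithmetic instead of the O(log n) loop.

-- ===== PORT A =====
-- the while loop of A, as structural recursion on the same state (h, pools)
def pvLoopA (stop_at_hw : Int) (h : Int) (pools : Int) : Int :=
  if 2 ≤ h ∧ stop_at_hw ≤ PySem.Int.floordiv h 2 then
    pvLoopA stop_at_hw (PySem.Int.floordiv h 2) (pools + 1)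
  else pools
termination_by h.toNat
decreasing_by
  rename_i hc
  have h2 : PySem.Int.floordiv h 2 = h / 2 := PySem.Int.floordiv_eq_ediv_of_pos (by omega)
  rw [h2]
  omega

def max_pools_allowed_py (input_hw : Int) (stop_at_hw : Int) : Int :=
  if input_hw ≤ 0 ∨ stop_at_hw ≤ 0 then 0
  else pvLoopA stop_at_hw input_hw 0

-- ===== PORT B =====
def max_pools_allowed_py_alt (input_hw : Int) (stop_at_hw : Int) : Int :=
  if input_hw ≤ 0 ∨ stop_at_hw ≤ 0 then 0
  else
    let q := PySem.Int.floordiv input_hw stop_at_hw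
    if 1 ≤ q then (PySem.Int.bitLength q : Int) - 1 else 0

-- ===== PRECONDITION & SPEC =====
def Spec_max_pools_allowed_py (input_hw : Int) (stop_at_hw : Int) (out : Int) : Prop := out = max_pools_allowed_py_alt input_hw stop_at_hw
instance (input_hw : Int) (stop_at_hw : Int) (out : Int) : Decidable (Spec_max_pools_allowed_py input_hw stop_at_hw out) := by unfold Spec_max_pools_allowed_py; infer_instance

-- ===== CLAIM (what is proved, stated in full; the proofs are below) =====
def Claim_equal_max_pools_allowed_py : Prop := ∀ (input_hw : Int) (stop_at_hw : Int), Dom_max_pools_allowed_py input_hw stop_at_hw → Spec_max_pools_allowed_py input_hw stop_at_hw (max_pools_allowed_py input_hw stop_at_hw)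

-- ===== LEMMAS AND PROOFS =====

-- loop invariant: for positive h and stop, the loop adds floor(log2(h // stop)) to pools (0 when the quotient is 0)
theorem pvLoopA_eq (stop : Int) (hstop : 1 ≤ stop) :
    ∀ (h pools : Int), 1 ≤ h →
      pvLoopA stop h pools =
        pools + (if 1 ≤ PySem.Int.floordiv h stop then (PySem.Int.bitLength (PySem.Int.floordiv h stop) : Int) - 1 else 0) := by
  suffices H : ∀ (n : Nat) (h pools : Int), h.toNat = n → 1 ≤ h →
      pvLoopA stop h pools =
        pools + (if 1 ≤ PySem.Int.floordiv h stop then (PySem.Int.bitLength (PySem.Int.floordiv h stop) : Int) - 1 else 0) by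
    intro h pools hh; exact H h.toNat h pools rfl hh
  intro n
  induction n using Nat.strong_induction_on with
  | _ n ih =>
  intro h pools hn hh
  rw [pvLoopA]
  have hq : PySem.Int.floordiv h stop = h / stop := PySem.Int.floordiv_eq_ediv_of_pos (by omega)
  have h2 : PySem.Int.floordiv h 2 = h / 2 := PySem.Int.floordiv_eq_ediv_of_pos (by omega)
  by_cases hc : 2 ≤ h ∧ stop ≤ PySem.Int.floordiv h 2
  · obtain ⟨hc1, hc2⟩ := hc
    rw [if_pos ⟨hc1, hc2⟩, h2]
    rw [h2] at hc2
    have hge : stop * 2 ≤ h := (Int.le_ediv_iff_mul_le (by omega)).mp hc2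
    rw [ih (h / 2).toNat (by omega) (h / 2) (pools + 1) rfl (by omega)]
    have hq' : PySem.Int.floordiv (h / 2) stop = h / 2 / stop :=
      PySem.Int.floordiv_eq_ediv_of_pos (by omega)
    rw [hq', hq]
    have hcomm : h / 2 / stop = h / stop / 2 := by
      rw [Int.ediv_ediv_of_nonneg (by omega), Int.ediv_ediv_of_nonneg (by omega), Int.mul_comm]
    have hq2 : 2 ≤ h / stop := (Int.le_ediv_iff_mul_le (by omega)).mpr (by omega)
    have hq1' : 1 ≤ h / stop / 2 := (Int.le_ediv_iff_mul_le (by omega)).mpr (by omega)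
    have hbit : PySem.Int.bitLength (h / stop) = PySem.Int.bitLength (PySem.Int.floordiv (h / stop) 2) + 1 :=
      PySem.Int.bitLength_of_pos (by omega)
    have hfd : PySem.Int.floordiv (h / stop) 2 = h / stop / 2 := PySem.Int.floordiv_eq_ediv_of_pos (by omega)
    rw [hfd] at hbit
    rw [hcomm, if_pos hq1', if_pos (by omega : (1:Int) ≤ h / stop), hbit]
    push_cast
    ring
  · rw [if_neg hc, hq]
    rw [h2] at hc
    -- loop did not run: the quotient is at most 1, and bit_length 1 = 1
    have hqle : h / stop ≤ 1 := by
      by_contra hgt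
      have hq2 : (2:Int) ≤ h / stop := by omega
      have hge : 2 * stop ≤ h := (Int.le_ediv_iff_mul_le (by omega)).mp hq2
      have hstop2 : stop ≤ h / 2 := (Int.le_ediv_iff_mul_le (by omega)).mpr (by omega)
      exact hc ⟨by omega, hstop2⟩
    by_cases hq1 : 1 ≤ h / stop
    · have hone : h / stop = 1 := by omega
      rw [hone, if_pos (by omega : (1:Int) ≤ 1),
        (by decide : (PySem.Int.bitLength 1 : Int) = 1)]
      ring
    · rw [if_neg hq1]
      ring

theorem max_pools_allowed_py_spec : Claim_equal_max_pools_allowed_py := by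
  intro input_hw stop_at_hw _
  unfold Spec_max_pools_allowed_py max_pools_allowed_py max_pools_allowed_py_alt
  by_cases hg : input_hw ≤ 0 ∨ stop_at_hw ≤ 0
  · simp [hg]
  · obtain ⟨h1, h2⟩ := not_or.mp hg
    rw [if_neg hg, if_neg hg, pvLoopA_eq stop_at_hw (by omega) input_hw 0 (by omega)]
    dsimp only
    omega
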